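-- pv_equiv track=rewrite | github.com/yyh769130635/zx2020 | test.py | paixu
-- ===== SOURCE A (Python) =====
-- def paixu(res):
--     length=len(res)
--     # 先对每一行，行中元素排序
--     for i in range(length):
--        res[i].sort()
--
--     list_new=[]
--     for i in res:
--         if i not in list_new:
--             list_new.append(i)
--     count=len(list_new)
--     return count
-- ===== SOURCE B (Python) =====
-- def paixu(res):
--     length = len(res)
--     # keep A's in-place per-row sort (observable mutation)
--     for i in range(length):
--         res[i].sort()
--     count = 0
--     prev = None
--     for row in sorted(res):
--         if prev is None or row != prev:
--             count += 1
--         prev = row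
--     return count
-- ===== Notes on version B (the rewrite author's own statement) =====
-- stated objective: alternative
-- what changed: B replaces A's quadratic membership-test dedup list with sort-then-scan: it sorts a copy of the rows and counts group boundaries in one pass over adjacent pairs.
import Mathlib
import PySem

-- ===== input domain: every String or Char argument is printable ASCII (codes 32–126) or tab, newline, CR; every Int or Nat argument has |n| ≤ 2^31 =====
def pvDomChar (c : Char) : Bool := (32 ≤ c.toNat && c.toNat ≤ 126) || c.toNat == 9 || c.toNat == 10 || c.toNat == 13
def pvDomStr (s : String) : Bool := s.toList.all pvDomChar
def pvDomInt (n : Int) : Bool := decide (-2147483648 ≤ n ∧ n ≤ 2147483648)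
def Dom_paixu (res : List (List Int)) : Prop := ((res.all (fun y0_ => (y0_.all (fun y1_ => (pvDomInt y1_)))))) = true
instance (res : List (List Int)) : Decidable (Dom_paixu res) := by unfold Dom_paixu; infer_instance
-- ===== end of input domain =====

-- B keeps A's in-place per-row sort but replaces A's quadratic membership-dedup list by
-- sorting a copy of the rows and counting group boundaries in one pass (objective: alternative).
-- Equivalence is about the RETURN value; both versions also sort each row of `res` in place.

-- ===== PORT A =====
def paixu (res : List (List Int)) : Int :=
  let length : Int := res.length
  -- for i in range(length): res[i].sort()
  let res2 := (PySem.List.pyRange 0 length 1).foldl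
      (fun r i => PySem.List.pySetD r i
        (PySem.List.sorted (PySem.List.pyGetD r i []) (fun x => x) false)) res
  -- list_new = []; for i in res: if i not in list_new: list_new.append(i)
  let list_new := res2.foldl
      (fun acc i => if acc.contains i then acc else acc ++ [i]) ([] : List (List Int))
  (list_new.length : Int)

-- ===== PORT B =====
def paixu_alt (res : List (List Int)) : Int :=
  let length : Int := res.length
  -- for i in range(length): res[i].sort()   (kept identical to A: observable mutation)
  let res2 := (PySem.List.pyRange 0 length 1).foldl
      (fun r i => PySem.List.pySetD r i
        (PySem.List.sorted (PySem.List.pyGetD r i []) (fun x => x) false)) res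
  -- count = 0; prev = None; for row in sorted(res): if prev is None or row != prev: count += 1; prev = row
  let fin := (PySem.List.sorted res2 (fun x => x) false).foldl
      (fun (st : Int × Option (List Int)) row =>
        ((if st.2 = none ∨ st.2 ≠ some row then st.1 + 1 else st.1), some row))
      ((0 : Int), (none : Option (List Int)))
  fin.1

-- ===== PRECONDITION & SPEC =====
def Spec_paixu (res : List (List Int)) (out : Int) : Prop := out = paixu_alt res
instance (res : List (List Int)) (out : Int) : Decidable (Spec_paixu res out) := by unfold Spec_paixu; infer_instance

-- ===== CLAIM (what is proved, stated in full; the proofs are below) =====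
def Claim_equal_paixu : Prop := ∀ (res : List (List Int)), Dom_paixu res → Spec_paixu res (paixu res)

-- ===== LEMMAS AND PROOFS =====

-- The single counting step of B's final loop.
def pvStep (st : Int × Option (List Int)) (row : List Int) : Int × Option (List Int) :=
  ((if st.2 = none ∨ st.2 ≠ some row then st.1 + 1 else st.1), some row)

lemma pvFoldl_add_cons {α : Type} [BEq α] [LawfulBEq α]
    (l : List α) (a : α) (ha : a ∉ l) :
    ∀ s : List α, List.foldl PySem.Set.add (a :: s) l = a :: List.foldl PySem.Set.add s l := by
  induction l with
  | nil => intro s; rfl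
  | cons x t ih =>
    intro s
    have hax : a ≠ x := fun h => ha (h ▸ List.mem_cons_self)
    have hat : a ∉ t := fun h => ha (List.mem_cons_of_mem _ h)
    simp only [List.foldl_cons]
    have hadd : PySem.Set.add (a :: s) x = a :: PySem.Set.add s x := by
      simp [PySem.Set.add, PySem.Set.contains, (Ne.symm hax)]
      split <;> simp
    rw [hadd, ih hat]

lemma pvOfList_cons_not_mem {α : Type} [BEq α] [LawfulBEq α] (a : α) (l : List α)
    (ha : a ∉ l) : PySem.Set.ofList (a :: l) = a :: PySem.Set.ofList l := by
  show List.foldl PySem.Set.add PySem.Set.empty (a :: l) = _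
  simp only [List.foldl_cons]
  have : PySem.Set.add PySem.Set.empty a = [a] := rfl
  rw [this]
  exact pvFoldl_add_cons l a ha []

-- The port's `sorted` (core List.instLT instances) equals the same `sorted` under the
-- LinearOrder-derived instances that the PySem order lemmas are stated with.
lemma pvSorted_eq (xs : List (List Int)) :
    PySem.List.sorted xs (fun x : List Int => x) false
      = @PySem.List.sorted (List Int) (List Int) List.instLinearOrder.toLT
          LinearOrder.toDecidableLT xs (fun x => x) false := by
  congr 1

-- B's loop after the first element: state (c, some p) over a tail ys with (p :: ys) sorted.
lemma pvG1 : ∀ (ys : List (List Int)) (p : List Int) (c : Int),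
    (p :: ys).Pairwise (· ≤ ·) →
    (ys.foldl pvStep (c, some p)).1 = c + ((PySem.Set.ofList (p :: ys)).length : Int) - 1 := by
  intro ys
  induction ys with
  | nil =>
    intro p c _
    simp [PySem.Set.ofList, PySem.Set.add, PySem.Set.empty, PySem.Set.contains]
  | cons b t ih =>
    intro p c hpw
    have hpb : p ≤ b := (List.pairwise_cons.1 hpw).1 b List.mem_cons_self
    have hbt : (b :: t).Pairwise (· ≤ ·) := (List.pairwise_cons.1 hpw).2
    by_cases hbp : b = p
    · subst hbp
      have hstep : pvStep (c, some b) b = (c, some b) := by simp [pvStep]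
      have hofl : PySem.Set.ofList (b :: b :: t) = PySem.Set.ofList (b :: t) := by
        rw [PySem.Set.ofList_eq_foldl, PySem.Set.ofList_eq_foldl]
        simp [List.foldl_cons, PySem.Set.add, PySem.Set.contains]
      simp only [List.foldl_cons, hstep, hofl]
      exact ih b c hbt
    · have hstep : pvStep (c, some p) b = (c + 1, some b) := by
        simp [pvStep, Ne.symm hbp]
      have hpnot : p ∉ b :: t := by
        intro hmem
        rcases List.mem_cons.1 hmem with h | h
        · exact hbp h.symm
        · have hbx : b ≤ p := (List.pairwise_cons.1 hbt).1 p h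
          exact hbp (le_antisymm hbx hpb)
      have hofl : PySem.Set.ofList (p :: b :: t) = p :: PySem.Set.ofList (b :: t) :=
        pvOfList_cons_not_mem p (b :: t) hpnot
      simp only [List.foldl_cons, hstep]
      rw [ih b (c + 1) hbt, hofl]
      simp only [List.length_cons]
      push_cast
      ring

-- B's whole final loop on a sorted list counts the distinct elements.
lemma pvG0 (ys : List (List Int)) (h : ys.Pairwise (· ≤ ·)) :
    (ys.foldl pvStep ((0 : Int), none)).1 = ((PySem.Set.ofList ys).length : Int) := by
  cases ys with
  | nil => rfl
  | cons a t =>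
    have hstep : pvStep (0, none) a = (1, some a) := by simp [pvStep]
    simp only [List.foldl_cons, hstep]
    rw [pvG1 t a 1 h]
    ring

-- A's dedup loop builds exactly PySem.Set.ofList.
lemma pvA_dedup (rows : List (List Int)) :
    rows.foldl (fun acc i => if acc.contains i then acc else acc ++ [i])
      ([] : List (List Int)) = PySem.Set.ofList rows := by
  rw [PySem.Set.ofList_eq_foldl]
  rfl

-- ofList has the same length on any permutation of the input.
lemma pvOfList_len_perm (xs ys : List (List Int)) (h : xs.Perm ys) :
    (PySem.Set.ofList xs).length = (PySem.Set.ofList ys).length := by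
  have hperm : (PySem.Set.ofList xs).Perm (PySem.Set.ofList ys) := by
    rw [List.perm_ext_iff_of_nodup (PySem.Set.nodup_ofList xs) (PySem.Set.nodup_ofList ys)]
    intro a
    rw [PySem.Set.mem_ofList, PySem.Set.mem_ofList]
    exact h.mem_iff
  exact hperm.length_eq

-- ===== VERDICT (by name: the statement is the Claim_ definition above) =====
theorem paixu_spec : Claim_equal_paixu := by
  intro res _
  unfold Spec_paixu paixu paixu_alt
  simp only []
  set res2 := (PySem.List.pyRange 0 (res.length : Int) 1).foldl
      (fun r i => PySem.List.pySetD r i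
        (PySem.List.sorted (PySem.List.pyGetD r i []) (fun x => x) false)) res with hres2
  have hA : (res2.foldl (fun acc i => if acc.contains i then acc else acc ++ [i])
      ([] : List (List Int))).length = (PySem.Set.ofList res2).length := by
    rw [pvA_dedup]
  have hB : ((PySem.List.sorted res2 (fun x => x) false).foldl pvStep ((0 : Int), none)).1
      = ((PySem.Set.ofList (PySem.List.sorted res2 (fun x => x) false)).length : Int) := by
    rw [pvSorted_eq]
    exact pvG0 _ (PySem.List.sorted_pairwise res2 (fun x => x))
  have hperm : (PySem.Set.ofList (PySem.List.sorted res2 (fun x => x) false)).length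
      = (PySem.Set.ofList res2).length := by
    rw [pvSorted_eq]
    exact pvOfList_len_perm _ res2 (@PySem.List.sorted_perm (List Int) (List Int)
      List.instLinearOrder.toLT LinearOrder.toDecidableLT res2 (fun x => x) false)
  show ((res2.foldl (fun acc i => if acc.contains i then acc else acc ++ [i])
      ([] : List (List Int))).length : Int)
      = ((PySem.List.sorted res2 (fun x => x) false).foldl
          (fun (st : Int × Option (List Int)) row =>
            ((if st.2 = none ∨ st.2 ≠ some row then st.1 + 1 else st.1), some row))
          ((0 : Int), none)).1
  rw [hA]
  have : ((PySem.List.sorted res2 (fun x => x) false).foldl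
          (fun (st : Int × Option (List Int)) row =>
            ((if st.2 = none ∨ st.2 ≠ some row then st.1 + 1 else st.1), some row))
          ((0 : Int), none)) = ((PySem.List.sorted res2 (fun x => x) false).foldl pvStep
          ((0 : Int), none)) := rfl
  rw [this, hB, hperm]
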